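-- pv_equiv track=rewrite | github.com/krniya/Algorithms | Python/Backtracking/L_pathWithMaxGold.py | checkIfAllNonZeros
-- ===== SOURCE A (Python) =====
-- def checkIfAllNonZeros(grid):
--     count = 0
--     for row in grid:
--         for cell in row:
--             if cell != 0:
--                 count += cell
--             else:
--                 return 0
--     return count
-- ===== SOURCE B (Python) =====
-- def checkIfAllNonZeros(grid):
--     ok = all(cell != 0 for row in grid for cell in row)
--     return sum(sum(row) for row in grid) if ok else 0
-- ===== Notes on version B (the rewrite author's own statement) =====
-- stated objective: simpler
-- what changed: Replaces the fused early-return accumulation loop by two separate passes: an all() validity check followed by a sum of row sums.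
import Mathlib
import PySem

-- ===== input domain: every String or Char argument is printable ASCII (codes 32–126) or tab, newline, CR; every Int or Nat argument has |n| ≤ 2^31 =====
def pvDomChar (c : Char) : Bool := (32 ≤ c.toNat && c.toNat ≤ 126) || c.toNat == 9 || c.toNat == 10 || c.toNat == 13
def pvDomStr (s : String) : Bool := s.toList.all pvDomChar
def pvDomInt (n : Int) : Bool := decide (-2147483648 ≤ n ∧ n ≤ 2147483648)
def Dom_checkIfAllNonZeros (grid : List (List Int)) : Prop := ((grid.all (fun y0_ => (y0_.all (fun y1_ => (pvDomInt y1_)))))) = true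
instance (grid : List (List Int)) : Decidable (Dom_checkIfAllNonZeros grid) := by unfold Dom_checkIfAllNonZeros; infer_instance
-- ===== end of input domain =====

-- B replaces A's fused early-return accumulation loop by two separate passes
-- (an all-nonzero check, then a sum of row sums); objective: simpler.

-- ===== PORT A =====
-- inner loop over one row: `none` models the early `return 0`
def chkRow (count : Int) : List Int → Option Int
  | [] => some count
  | c :: cs => if c ≠ 0 then chkRow (count + c) cs else none

def chkGrid (count : Int) : List (List Int) → Int
  | [] => count
  | r :: rs =>
    match chkRow count r with
    | some c => chkGrid c rs
    | none => 0

def checkIfAllNonZeros (grid : List (List Int)) : Int := chkGrid 0 grid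

-- ===== PORT B =====
def checkIfAllNonZeros_alt (grid : List (List Int)) : Int :=
  let ok := grid.all (fun row => row.all (fun cell => cell ≠ 0))
  if ok then (grid.map (fun row => row.sum)).sum else 0

-- ===== PRECONDITION & SPEC =====
def Spec_checkIfAllNonZeros (grid : List (List Int)) (out : Int) : Prop := out = checkIfAllNonZeros_alt grid
instance (grid : List (List Int)) (out : Int) : Decidable (Spec_checkIfAllNonZeros grid out) := by unfold Spec_checkIfAllNonZeros; infer_instance

-- ===== CLAIM (what is proved, stated in full; the proofs are below) =====
def Claim_equal_checkIfAllNonZeros : Prop := ∀ (grid : List (List Int)), Dom_checkIfAllNonZeros grid → Spec_checkIfAllNonZeros grid (checkIfAllNonZeros grid)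

-- ===== LEMMAS AND PROOFS =====
theorem chkRow_eq (r : List Int) : ∀ count : Int,
    chkRow count r = if r.all (fun c => c ≠ 0) then some (count + r.sum) else none := by
  induction r with
  | nil => intro count; simp [chkRow]
  | cons c cs ih =>
    intro count
    by_cases h : c = 0
    · simp [chkRow, h]
    · simp [chkRow, h, ih, add_assoc]

theorem chkGrid_eq (rs : List (List Int)) : ∀ count : Int,
    chkGrid count rs =
      if rs.all (fun row => row.all (fun c => c ≠ 0)) then count + (rs.map (fun row => row.sum)).sum
      else 0 := by
  induction rs with
  | nil => intro count; simp [chkGrid]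
  | cons r rest ih =>
    intro count
    rw [chkGrid, chkRow_eq]
    cases h : r.all (fun c => c ≠ 0) with
    | true =>
      rw [List.all_eq_true] at h
      simp only [decide_eq_true_eq] at h
      simp [ih, add_assoc]
      simp only [and_iff_right h]
    | false =>
      rw [List.all_eq_false] at h
      obtain ⟨x, hx, hx0⟩ := h
      simp only [decide_eq_true_eq, not_not] at hx0
      simp [List.all_cons]
      intro h1
      exact absurd hx0 (h1 x hx)

-- ===== VERDICT (by name: the statement is the Claim_ definition above) =====
theorem checkIfAllNonZeros_spec : Claim_equal_checkIfAllNonZeros := by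
  intro grid _
  unfold Spec_checkIfAllNonZeros checkIfAllNonZeros checkIfAllNonZeros_alt
  rw [chkGrid_eq]
  simp
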